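-- pv_equiv track=rewrite | github.com/ggb667/EVH | scripts/instinct_active_patients_audit.py | _locate_columns
-- ===== SOURCE A (Python) =====
-- IDENTIFIER_CANDIDATES: dict[str, tuple[str, ...]] = {
--     "pms_id": (
--         "pms id",
--         "pims id",
--         "pimsid",
--         "pmsid",
--         "patient pms id",
--         "patient_pms_id",
--         "patient id",
--         "id",
--         "external id",
--         "external_id",
--         "code",
--     ),
--     "patient_name": ("patient", "patient name", "name", "pet name", "pet"),
--     "owner_name": ("owner", "owner name", "client", "client name"),
--     "owner_email": ("email", "owner email", "client email"),
--     "owner_phone": ("phone", "owner phone", "client phone", "mobile"),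
--     "species": ("species",),
--     "breed": ("breed", "breed name"),
--     "sex": ("sex", "gender"),
-- }
--
-- def _normalize(text: str) -> str:
--     return " ".join(text.strip().lower().replace("_", " ").split())
--
-- def _locate_columns(fieldnames: list[str]) -> dict[str, str]:
--     normalized_to_original = {_normalize(name): name for name in fieldnames}
--     found: dict[str, str] = {}
--     for logical_name, aliases in IDENTIFIER_CANDIDATES.items():
--         for alias in aliases:
--             if alias in normalized_to_original:
--                 found[logical_name] = normalized_to_original[alias]
--                 break
--     return found
-- ===== SOURCE B (Python) =====
-- IDENTIFIER_CANDIDATES: dict[str, tuple[str, ...]] = {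
--     "pms_id": (
--         "pms id",
--         "pims id",
--         "pimsid",
--         "pmsid",
--         "patient pms id",
--         "patient_pms_id",
--         "patient id",
--         "id",
--         "external id",
--         "external_id",
--         "code",
--     ),
--     "patient_name": ("patient", "patient name", "name", "pet name", "pet"),
--     "owner_name": ("owner", "owner name", "client", "client name"),
--     "owner_email": ("email", "owner email", "client email"),
--     "owner_phone": ("phone", "owner phone", "client phone", "mobile"),
--     "species": ("species",),
--     "breed": ("breed", "breed name"),
--     "sex": ("sex", "gender"),
-- }
--
--
-- def _normalize(text: str) -> str:
--     return " ".join(text.strip().lower().replace("_", " ").split())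
--
--
-- def _locate_columns(fieldnames: list[str]) -> dict[str, str]:
--     # Single pass over the columns: for each column, find which logical field
--     # it could serve and at what alias priority, keeping the best-ranked
--     # candidate seen so far for each logical field.
--     best: dict[str, tuple[int, str]] = {}
--     for name in fieldnames:
--         norm = _normalize(name)
--         for logical, aliases in IDENTIFIER_CANDIDATES.items():
--             if norm in aliases:
--                 rank = aliases.index(norm)
--                 prev = best.get(logical)
--                 if prev is None or rank <= prev[0]:
--                     best[logical] = (rank, name)
--     return {logical: best[logical][1] for logical in IDENTIFIER_CANDIDATES if logical in best}
-- ===== Notes on version B (the rewrite author's own statement) =====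
-- stated objective: alternative
-- what changed: B inverts the loop nesting: instead of pre-indexing normalized column names and probing it per alias, B makes a single pass over the columns, matching each column's normalized form against every logical field's alias tuple and keeping the best-ranked match per logical field.
import Mathlib
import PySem

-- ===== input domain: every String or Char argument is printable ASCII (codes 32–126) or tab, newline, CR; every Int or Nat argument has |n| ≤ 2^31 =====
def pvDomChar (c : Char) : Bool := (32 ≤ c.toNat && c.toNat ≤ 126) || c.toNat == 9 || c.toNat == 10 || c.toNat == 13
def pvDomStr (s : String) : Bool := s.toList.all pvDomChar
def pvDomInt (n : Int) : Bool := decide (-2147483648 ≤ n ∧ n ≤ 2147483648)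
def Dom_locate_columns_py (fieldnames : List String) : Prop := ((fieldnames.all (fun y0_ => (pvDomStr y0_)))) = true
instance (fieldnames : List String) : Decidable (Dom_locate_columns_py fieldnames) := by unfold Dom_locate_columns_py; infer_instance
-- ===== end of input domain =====

-- B inverts the loop nesting: one pass over the columns keeping, per logical field,
-- the best-ranked (and else latest) matching column; same results, different algorithm.

-- shared module-level context: IDENTIFIER_CANDIDATES and _normalize
def pvCandidates : List (String × List String) :=
  [ ("pms_id", ["pms id", "pims id", "pimsid", "pmsid", "patient pms id",
      "patient_pms_id", "patient id", "id", "external id", "external_id", "code"]),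
    ("patient_name", ["patient", "patient name", "name", "pet name", "pet"]),
    ("owner_name", ["owner", "owner name", "client", "client name"]),
    ("owner_email", ["email", "owner email", "client email"]),
    ("owner_phone", ["phone", "owner phone", "client phone", "mobile"]),
    ("species", ["species"]),
    ("breed", ["breed", "breed name"]),
    ("sex", ["sex", "gender"]) ]

-- _normalize: " ".join(text.strip().lower().replace("_", " ").split())
def pvNormalize (text : String) : String :=
  PySem.Str.join " " (PySem.Str.split₀ (PySem.Str.replace (PySem.Str.lower (PySem.Str.strip text)) "_" " "))

-- ===== PORT A =====
-- inner 'for alias in aliases: if alias in d: found[...] = d[alias]; break'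
def pvAliasLoopA (found : PySem.Dict String String) (nto : PySem.Dict String String)
    (logical : String) : List String → PySem.Dict String String
  | [] => found
  | a :: rest =>
    match nto.get? a with
    | some v => found.insert logical v
    | none => pvAliasLoopA found nto logical rest

def locate_columns_py (fieldnames : List String) : List (String × String) :=
  let nto : PySem.Dict String String :=
    fieldnames.foldl (fun d name => d.insert (pvNormalize name) name) PySem.Dict.empty
  let found : PySem.Dict String String :=
    pvCandidates.foldl (fun f p => pvAliasLoopA f nto p.1 p.2) PySem.Dict.empty
  found.items

-- ===== PORT B =====
-- body of the inner 'for logical, aliases in IDENTIFIER_CANDIDATES.items():'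
def pvInner (name : String) (best : PySem.Dict String (Nat × String))
    (p : String × List String) : PySem.Dict String (Nat × String) :=
  if p.2.contains (pvNormalize name) then
    match PySem.List.index? p.2 (pvNormalize name) with
    | some rank =>
      match best.get? p.1 with
      | none => best.insert p.1 (rank, name)
      | some prev => if rank ≤ prev.1 then best.insert p.1 (rank, name) else best
    | none => best   -- unreachable: '.index' is guarded by the membership test
  else best

-- one column: try it against every logical field
def pvScanName (best : PySem.Dict String (Nat × String)) (name : String) :
    PySem.Dict String (Nat × String) :=
  pvCandidates.foldl (pvInner name) best

def locate_columns_py_alt (fieldnames : List String) : List (String × String) :=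
  let best := fieldnames.foldl pvScanName PySem.Dict.empty
  (pvCandidates.foldl (fun f p =>
      match best.get? p.1 with
      | some rv => f.insert p.1 rv.2
      | none => f) PySem.Dict.empty).items

-- ===== PRECONDITION & SPEC =====
def Spec_locate_columns_py (fieldnames : List String) (out : List (String × String)) : Prop := out = locate_columns_py_alt fieldnames
instance (fieldnames : List String) (out : List (String × String)) : Decidable (Spec_locate_columns_py fieldnames out) := by unfold Spec_locate_columns_py; infer_instance

-- ===== CLAIM (what is proved, stated in full; the proofs are below) =====
def Claim_equal_locate_columns_py : Prop := ∀ (fieldnames : List String), Dom_locate_columns_py fieldnames → Spec_locate_columns_py fieldnames (locate_columns_py fieldnames)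

-- ===== LEMMAS AND PROOFS =====

-- ---- proof-only helpers ----

-- B's per-logical update, extracted from pvInner for the key p.1 = L with aliases as
def pvUpd (as : List String) (acc : Option (Nat × String)) (name : String) :
    Option (Nat × String) :=
  if as.contains (pvNormalize name) then
    match PySem.List.index? as (pvNormalize name) with
    | some rank =>
      match acc with
      | none => some (rank, name)
      | some prev => if rank ≤ prev.1 then some (rank, name) else acc
    | none => acc
  else acc

-- A's per-alias probe: the last column whose normalized form equals a
def pvLastMatch (fieldnames : List String) (a : String) : Option String :=
  fieldnames.foldl (fun acc name => if pvNormalize name == a then some name else acc) none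

-- A's per-logical result: first alias with a matching column
def pvFirstAlias (xs : List String) : List String → Option String
  | [] => none
  | a :: rest =>
    match pvLastMatch xs a with
    | some v => some v
    | none => pvFirstAlias xs rest

-- lookup in the dict built by A's comprehension = last-match scan
theorem pv_get_fold (xs : List String) (d : PySem.Dict String String) (k : String) :
    (xs.foldl (fun d name => d.insert (pvNormalize name) name) d).get? k
      = xs.foldl (fun acc name => if pvNormalize name == k then some name else acc) (d.get? k) := by
  induction xs generalizing d with
  | nil => rfl
  | cons x xs ih =>
    rw [List.foldl_cons, ih, List.foldl_cons]
    have hinit : ((d.insert (pvNormalize x) x).get? k)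
        = (if pvNormalize x == k then some x else d.get? k) := by
      rw [PySem.Dict.get?_insert]
      by_cases h : pvNormalize x = k
      · simp [h]
      · simp [h, Ne.symm h]
    rw [hinit]

theorem pv_lastMatch_eq (fieldnames : List String) (a : String) :
    pvLastMatch fieldnames a
      = (fieldnames.foldl (fun d name => d.insert (pvNormalize name) name) PySem.Dict.empty).get? a := by
  rw [pv_get_fold]; rfl

-- A's alias loop in terms of pvFirstAlias
theorem pv_loopA_char (xs : List String) (f : PySem.Dict String String)
    (L : String) (as : List String) :
    pvAliasLoopA f (xs.foldl (fun d name => d.insert (pvNormalize name) name) PySem.Dict.empty) L as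
      = match pvFirstAlias xs as with
        | some v => f.insert L v
        | none => f := by
  induction as with
  | nil => rfl
  | cons a rest ih =>
    simp only [pvAliasLoopA, pvFirstAlias, ← pv_lastMatch_eq]
    cases pvLastMatch xs a with
    | none => simpa using ih
    | some v => rfl

-- ---- projecting B's fold to one logical key ----

theorem pv_inner_get_ne (name : String) (b : PySem.Dict String (Nat × String))
    (p : String × List String) (L : String) (h : p.1 ≠ L) :
    (pvInner name b p).get? L = b.get? L := by
  simp only [pvInner]
  split_ifs
  · cases PySem.List.index? p.2 (pvNormalize name) with
    | none => rfl
    | some rank =>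
      cases b.get? p.1 with
      | none => exact PySem.Dict.get?_insert_of_ne b (rank, name) (Ne.symm h)
      | some prev =>
        by_cases hr : rank ≤ prev.1
        · simp only [if_pos hr]; exact PySem.Dict.get?_insert_of_ne b (rank, name) (Ne.symm h)
        · simp only [if_neg hr]
  · rfl

theorem pv_inner_get_self (name : String) (b : PySem.Dict String (Nat × String))
    (L : String) (as : List String) :
    (pvInner name b (L, as)).get? L = pvUpd as (b.get? L) name := by
  simp only [pvInner, pvUpd]
  split_ifs
  · cases PySem.List.index? as (pvNormalize name) with
    | none => rfl
    | some rank =>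
      cases hb : b.get? L with
      | none => exact PySem.Dict.get?_insert_self b L (rank, name)
      | some prev =>
        by_cases hr : rank ≤ prev.1
        · simp only [if_pos hr]; exact PySem.Dict.get?_insert_self b L (rank, name)
        · simp only [if_neg hr]; exact hb
  · rfl

theorem pv_fold_inner_notouch (name : String) (cands : List (String × List String))
    (b : PySem.Dict String (Nat × String)) (L : String)
    (h : ∀ p ∈ cands, p.1 ≠ L) :
    (cands.foldl (pvInner name) b).get? L = b.get? L := by
  induction cands generalizing b with
  | nil => rfl
  | cons p rest ih =>
    rw [List.foldl_cons, ih _ (fun q hq => h q (List.mem_cons_of_mem p hq)),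
        pv_inner_get_ne name b p L (h p List.mem_cons_self)]

theorem pv_scan_get (name : String) (b : PySem.Dict String (Nat × String))
    (L : String) (as : List String)
    (hnd : (pvCandidates.map Prod.fst).Nodup) (hmem : (L, as) ∈ pvCandidates) :
    (pvScanName b name).get? L = pvUpd as (b.get? L) name := by
  unfold pvScanName
  revert hnd hmem
  generalize pvCandidates = cands
  intro hnd hmem
  induction cands generalizing b with
  | nil => cases hmem
  | cons p rest ih =>
    rw [List.map_cons, List.nodup_cons] at hnd
    rcases List.mem_cons.mp hmem with h | h
    · rw [List.foldl_cons]
      have hL : p.1 = L := by rw [← h]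
      have hnotouch : ∀ q ∈ rest, q.1 ≠ L := by
        intro q hq hq1
        exact hnd.1 (by rw [hL, ← hq1]; exact List.mem_map.mpr ⟨q, hq, rfl⟩)
      rw [pv_fold_inner_notouch name rest _ L hnotouch, h.symm, pv_inner_get_self]
    · have hpL : p.1 ≠ L := by
        intro he
        exact hnd.1 (by rw [he]; exact List.mem_map.mpr ⟨(L, as), h, rfl⟩)
      rw [List.foldl_cons, ih _ hnd.2 h, pv_inner_get_ne name b p L hpL]

theorem pv_best_get (xs : List String) (d : PySem.Dict String (Nat × String))
    (L : String) (as : List String)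
    (hnd : (pvCandidates.map Prod.fst).Nodup) (hmem : (L, as) ∈ pvCandidates) :
    (xs.foldl pvScanName d).get? L = xs.foldl (pvUpd as) (d.get? L) := by
  induction xs generalizing d with
  | nil => rfl
  | cons n t ih =>
    rw [List.foldl_cons, ih, List.foldl_cons, pv_scan_get n d L as hnd hmem]

-- ---- the core: pvUpd-fold vs first-alias search ----

-- a scan ending in none saw no match (and started from none)
theorem pv_lm_none (a : String) (t : List String) (acc : Option String)
    (h : t.foldl (fun acc name => if pvNormalize name == a then some name else acc) acc = none) :
    acc = none ∧ ∀ n ∈ t, (pvNormalize n == a) = false := by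
  induction t generalizing acc with
  | nil => exact ⟨h, by simp⟩
  | cons m t ih =>
    rw [List.foldl_cons] at h
    obtain ⟨h1, h2⟩ := ih _ h
    by_cases hm : (pvNormalize m == a) = true
    · rw [if_pos hm] at h1; cases h1
    · rw [if_neg hm] at h1
      exact ⟨h1, fun n hn => by
        rcases List.mem_cons.mp hn with rfl | hn
        · exact Bool.eq_false_iff.mpr hm
        · exact h2 n hn⟩

theorem pv_lm_const (a : String) (t : List String) (acc : Option String)
    (h : ∀ n ∈ t, (pvNormalize n == a) = false) :
    t.foldl (fun acc name => if pvNormalize name == a then some name else acc) acc = acc := by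
  induction t generalizing acc with
  | nil => rfl
  | cons m t ih =>
    rw [List.foldl_cons, if_neg (by simp [h m List.mem_cons_self]),
        ih _ (fun n hn => h n (List.mem_cons_of_mem m hn))]

-- once the scan of the tail produces a hit, the starting accumulator is irrelevant
theorem pv_lm_absorb (a : String) (t : List String) :
    ∀ (w : String) (acc : Option String),
      t.foldl (fun acc name => if pvNormalize name == a then some name else acc) none = some w →
      t.foldl (fun acc name => if pvNormalize name == a then some name else acc) acc = some w := by
  induction t with
  | nil => intro w acc h; cases h
  | cons m t ih =>
    intro w acc h
    rw [List.foldl_cons] at h ⊢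
    cases h' : t.foldl (fun acc name => if pvNormalize name == a then some name else acc) none with
    | some w' =>
      have h1 := ih w' (if pvNormalize m == a then some m else none) h'
      rw [h1] at h
      obtain rfl : w = w' := (Option.some_inj.mp h).symm
      exact ih _ _ h'
    | none =>
      obtain ⟨_, h2⟩ := pv_lm_none a t _ h'
      rw [pv_lm_const a t _ h2] at h
      rw [pv_lm_const a t _ h2]
      by_cases hm : (pvNormalize m == a) = true
      · rw [if_pos hm] at h ⊢; exact h
      · rw [if_neg hm] at h; cases h

-- a rank-0 entry survives a scan that contains no further match for alias a
theorem pv_keep0 (a : String) (rest : List String) (t : List String) (v : String)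
    (h : ∀ n ∈ t, (pvNormalize n == a) = false) :
    t.foldl (pvUpd (a :: rest)) (some (0, v)) = some (0, v) := by
  induction t with
  | nil => rfl
  | cons m t ih =>
    rw [List.foldl_cons]
    have hm : (pvNormalize m == a) = false := h m List.mem_cons_self
    have hne : a ≠ pvNormalize m := fun he => by simp [he] at hm
    have hstep : pvUpd (a :: rest) (some ((0 : Nat), v)) m = some (0, v) := by
      unfold pvUpd
      split_ifs with hc
      · rw [PySem.List.index?_cons_of_ne rest hne]
        cases PySem.List.index? rest (pvNormalize m) with
        | none => rfl
        | some i => simp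
      · rfl
    rw [hstep, ih (fun n hn => h n (List.mem_cons_of_mem m hn))]

-- a matching column for alias a drives the (a :: rest) fold to rank 0, last hit kept
theorem pv_match0 (a : String) (rest : List String) (t : List String) (v : String)
    (h : pvLastMatch t a = some v) (acc : Option (Nat × String)) :
    t.foldl (pvUpd (a :: rest)) acc = some (0, v) := by
  induction t generalizing acc with
  | nil => cases h
  | cons n t ih =>
    unfold pvLastMatch at h
    rw [List.foldl_cons] at h
    rw [List.foldl_cons]
    cases h' : t.foldl (fun acc name => if pvNormalize name == a then some name else acc) none with
    | some w =>
      have h1 := pv_lm_absorb a t w (if pvNormalize n == a then some n else none) h'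
      rw [h1] at h
      obtain rfl : v = w := (Option.some_inj.mp h).symm
      exact ih (by unfold pvLastMatch; exact h') _
    | none =>
      obtain ⟨_, h2⟩ := pv_lm_none a t _ h'
      rw [pv_lm_const a t _ h2] at h
      by_cases hm : (pvNormalize n == a) = true
      · rw [if_pos hm] at h
        have hv : n = v := Option.some_inj.mp h
        have hna : pvNormalize n = a := eq_of_beq hm
        have hstep : pvUpd (a :: rest) acc n = some (0, n) := by
          unfold pvUpd
          rw [hna, if_pos (by simp), PySem.List.index?_cons_self]
          cases acc with
          | none => rfl
          | some prev => simp
        rw [hstep, pv_keep0 a rest t n h2, hv]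
      · rw [if_neg hm] at h; cases h

-- when no column matches a, the (a :: rest) fold is the rest fold with ranks shifted
theorem pv_shift (a : String) (rest : List String) (t : List String)
    (h : ∀ n ∈ t, (pvNormalize n == a) = false) (acc : Option (Nat × String)) :
    t.foldl (pvUpd (a :: rest)) (acc.map (fun rv => (rv.1 + 1, rv.2)))
      = (t.foldl (pvUpd rest) acc).map (fun rv => (rv.1 + 1, rv.2)) := by
  induction t generalizing acc with
  | nil => rfl
  | cons m t ih =>
    rw [List.foldl_cons, List.foldl_cons]
    have hm : (pvNormalize m == a) = false := h m List.mem_cons_self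
    have hne : a ≠ pvNormalize m := fun he => by simp [he] at hm
    have hstep : pvUpd (a :: rest) (acc.map (fun rv => (rv.1 + 1, rv.2))) m
        = (pvUpd rest acc m).map (fun rv => (rv.1 + 1, rv.2)) := by
      unfold pvUpd
      have hc : (a :: rest).contains (pvNormalize m) = rest.contains (pvNormalize m) := by
        simp
        intro he
        exact (hne he.symm).elim
      rw [hc, PySem.List.index?_cons_of_ne rest hne]
      split_ifs with hin
      · cases hi : PySem.List.index? rest (pvNormalize m) with
        | none => simp
        | some i =>
          simp only [Option.map_some]
          cases acc with
          | none => rfl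
          | some prev =>
            simp only [Option.map_some]
            by_cases hle : i ≤ prev.1
            · rw [if_pos hle, if_pos (by omega : i + 1 ≤ prev.1 + 1)]; rfl
            · rw [if_neg hle, if_neg (by omega : ¬ (i + 1 ≤ prev.1 + 1))]; rfl
      · rfl
    rw [hstep, ih (fun n hn => h n (List.mem_cons_of_mem m hn))]

-- the inverted single pass computes exactly A's first-alias search
theorem pv_core (as : List String) (xs : List String) :
    (xs.foldl (pvUpd as) none).map Prod.snd = pvFirstAlias xs as := by
  induction as generalizing xs with
  | nil =>
    have h : ∀ (acc : Option (Nat × String)), xs.foldl (pvUpd []) acc = acc := by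
      intro acc
      induction xs generalizing acc with
      | nil => rfl
      | cons n t ih => rw [List.foldl_cons, show pvUpd [] acc n = acc from rfl]; exact ih _
    rw [h none]; rfl
  | cons a rest ih =>
    cases h : pvLastMatch xs a with
    | some v =>
      rw [pv_match0 a rest xs v h none]
      simp [pvFirstAlias, h]
    | none =>
      obtain ⟨_, h2⟩ := pv_lm_none a xs none (by unfold pvLastMatch at h; exact h)
      have hs := pv_shift a rest xs h2 none
      simp only [Option.map_none] at hs
      rw [hs, Option.map_map]
      have hcomp : (Prod.snd ∘ fun rv : Nat × String => (rv.1 + 1, rv.2))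
          = (Prod.snd : Nat × String → String) := rfl
      rw [hcomp, ih]
      simp [pvFirstAlias, h]

-- ===== VERDICT (by name: the statement is the Claim_ definition above) =====
theorem locate_columns_py_spec : Claim_equal_locate_columns_py := by
  intro xs _
  show locate_columns_py xs = locate_columns_py_alt xs
  have hnd : (pvCandidates.map Prod.fst).Nodup := by decide
  have hstep : ∀ (f : PySem.Dict String String), ∀ p ∈ pvCandidates,
      pvAliasLoopA f (xs.foldl (fun d name => d.insert (pvNormalize name) name) PySem.Dict.empty) p.1 p.2
        = match (xs.foldl pvScanName PySem.Dict.empty).get? p.1 with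
          | some rv => f.insert p.1 rv.2
          | none => f := by
    intro f p hp
    rw [pv_loopA_char xs f p.1 p.2,
        pv_best_get xs PySem.Dict.empty p.1 p.2 hnd (by simpa using hp),
        ← pv_core p.2 xs]
    simp only [PySem.Dict.get?_empty] at *
    cases xs.foldl (pvUpd p.2) none with
    | none => rfl
    | some rv => rfl
  show (pvCandidates.foldl (fun f p => pvAliasLoopA f (xs.foldl (fun d name => d.insert (pvNormalize name) name) PySem.Dict.empty) p.1 p.2) PySem.Dict.empty).items
     = (pvCandidates.foldl (fun f p =>
          match (xs.foldl pvScanName PySem.Dict.empty).get? p.1 with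
          | some rv => f.insert p.1 rv.2
          | none => f) PySem.Dict.empty).items
  exact congrArg PySem.Dict.items
    (PySem.List.foldl_congr_mem pvCandidates _ _ _ hstep)
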